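-- pv_equiv track=rewrite | github.com/Rya-man/Quantum-Rubiks-Cube-Solver | tests/test_oracle_correctness.py | classical_eo_after_sequence
-- ===== SOURCE A (Python) =====
-- def classical_eo_after_sequence(eo_bits, seq_moves):
--     # quarter-turn F/F' flip EO for F-edge indices only; others unaffected (EO)
--     F_IDX = [0,4,8,7]
--     out = eo_bits.copy()
--     for mv in seq_moves:
--         if mv[0]=='F' and (len(mv)==1 or mv[1]=="'"):
--             for e in F_IDX:
--                 out[e] ^= 1
--     return out
-- ===== SOURCE B (Python) =====
-- def classical_eo_after_sequence(eo_bits, seq_moves):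
--     # positional: flip eo bit at F-edge positions by parity of F quarter-turn count
--     p = sum(1 for mv in seq_moves if mv[:2] in ("F", "F'")) % 2
--     return [b ^ p if i in (0, 4, 8, 7) else b for i, b in enumerate(eo_bits)]
-- ===== Notes on version B (the rewrite author's own statement) =====
-- stated objective: simpler
-- what changed: B never mutates an array: it counts F quarter-turns via a prefix-test guard (mv[:2] in ('F', "F'")), takes the parity, and rebuilds the list positionally with a comprehension over enumerate, XOR-ing the parity into the F-edge positions.
import Mathlib
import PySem

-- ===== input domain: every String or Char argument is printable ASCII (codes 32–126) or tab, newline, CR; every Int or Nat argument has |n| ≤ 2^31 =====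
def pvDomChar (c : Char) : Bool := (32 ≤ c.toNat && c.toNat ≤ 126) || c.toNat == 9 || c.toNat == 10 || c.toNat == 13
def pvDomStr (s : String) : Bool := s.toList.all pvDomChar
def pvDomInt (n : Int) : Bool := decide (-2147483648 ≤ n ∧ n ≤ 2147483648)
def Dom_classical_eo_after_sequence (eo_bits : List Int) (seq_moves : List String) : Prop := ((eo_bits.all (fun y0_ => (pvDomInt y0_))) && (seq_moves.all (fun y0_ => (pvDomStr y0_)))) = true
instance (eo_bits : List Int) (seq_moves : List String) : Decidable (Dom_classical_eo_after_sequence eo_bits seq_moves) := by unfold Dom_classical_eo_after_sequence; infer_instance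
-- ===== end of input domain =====

-- B never mutates an array: it counts F quarter-turns by a prefix test, takes the parity,
-- and rebuilds the list positionally, XOR-ing the parity into F-edge positions (objective: simpler).

-- ===== PORT A =====
-- the guard mv[0]=='F' and (len(mv)==1 or mv[1]=="'")
def pvIsFq (mv : String) : Bool :=
  (PySem.Str.pyGet? mv 0 == some 'F') && (PySem.Str.len mv == 1 || PySem.Str.pyGet? mv 1 == some '\'')

-- the inner `for e in F_IDX: out[e] ^= 1` loop; under Pre_ every index is in range,
-- so set/getD agree with Python's item assignment
def pvFlip (out : List Int) : List Int :=
  [0, 4, 8, 7].foldl (fun o (e : Nat) => o.set e (PySem.Int.bxor (o.getD e 0) 1)) out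

def classical_eo_after_sequence (eo_bits : List Int) (seq_moves : List String) : List Int :=
  seq_moves.foldl (fun out mv => if pvIsFq mv then pvFlip out else out) eo_bits

-- ===== PORT B =====
-- Source B's guard: mv[:2] in ("F", "F'")
def altIsFq (mv : String) : Bool :=
  ["F", "F'"].contains (PySem.Str.slice mv none (some 2))

def classical_eo_after_sequence_alt (eo_bits : List Int) (seq_moves : List String) : List Int :=
  let p : Int :=
    PySem.Int.mod (seq_moves.foldl (fun s mv => if altIsFq mv then s + 1 else s) (0 : Int)) 2
  (PySem.List.enumerate eo_bits).map
    (fun ib => if [(0 : Int), 4, 8, 7].contains ib.1 then PySem.Int.bxor ib.2 p else ib.2)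

-- ===== PRECONDITION & SPEC =====
-- Pre_ excludes exactly the inputs where Python A raises: a move that is the empty
-- string (mv[0] → IndexError), or a qualifying F move with fewer than 9 EO bits
-- (out[8] → IndexError).
def Pre_classical_eo_after_sequence (eo_bits : List Int) (seq_moves : List String) : Prop :=
  (∀ mv ∈ seq_moves, mv ≠ "") ∧
  ((∀ mv ∈ seq_moves, pvIsFq mv = false) ∨ 9 ≤ eo_bits.length)
instance (eo_bits : List Int) (seq_moves : List String) : Decidable (Pre_classical_eo_after_sequence eo_bits seq_moves) := by unfold Pre_classical_eo_after_sequence; infer_instance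

def pvWitness_classical_eo_after_sequence : List Int × List String :=
  ([0, 1, 0, 1, 0, 1, 0, 1, 0], ["F", "R", "F'", "F2"])

def Spec_classical_eo_after_sequence (eo_bits : List Int) (seq_moves : List String) (out : List Int) : Prop := out = classical_eo_after_sequence_alt eo_bits seq_moves
instance (eo_bits : List Int) (seq_moves : List String) (out : List Int) : Decidable (Spec_classical_eo_after_sequence eo_bits seq_moves out) := by unfold Spec_classical_eo_after_sequence; infer_instance

-- ===== CLAIM (what is proved, stated in full; the proofs are below) =====
def Claim_equal_classical_eo_after_sequence : Prop := ∀ (eo_bits : List Int) (seq_moves : List String), Dom_classical_eo_after_sequence eo_bits seq_moves → Pre_classical_eo_after_sequence eo_bits seq_moves → Spec_classical_eo_after_sequence eo_bits seq_moves (classical_eo_after_sequence eo_bits seq_moves)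

-- ===== LEMMAS AND PROOFS =====

-- the two move guards agree on every string
theorem guard_eq (mv : String) : altIsFq mv = pvIsFq mv := by
  unfold altIsFq pvIsFq
  simp only [PySem.Str.slice, PySem.Str.pyGet?, PySem.Str.len,
    PySem.Chars.slice_eq_listSlice, PySem.Chars.pyGet?_eq_listPyGet?]
  rcases h : mv.toList with _ | ⟨c, _ | ⟨d, t⟩⟩
  · simp [PySem.List.slice_to, PySem.List.pyGet?, PySem.List.pyIdx?, ← String.toList_inj]
  · simp [PySem.List.slice_to, PySem.List.pyGet?, PySem.List.pyIdx?, ← String.toList_inj]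
    rw [Bool.eq_iff_iff]; simp
  · simp only [PySem.List.pyGet?, PySem.List.pyIdx?, List.length_cons]
    rw [if_pos (by omega), if_pos (by omega)]
    simp [PySem.List.slice_to, ← String.toList_inj]
    rw [Bool.eq_iff_iff]
    simp
    exact fun _ h2 => absurd h2 (by omega)

theorem pvBxor1_invol (x : Int) : PySem.Int.bxor (PySem.Int.bxor x 1) 1 = x := by
  by_cases h : 0 ≤ x
  · simp only [PySem.Int.bxor, h, if_true, if_pos (by norm_num : (0:Int) ≤ 1)]
    rw [if_pos (by positivity)]
    simp
    omega
  · simp only [PySem.Int.bxor, h, if_false, if_pos (by norm_num : (0:Int) ≤ 1)]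
    rw [if_neg (by omega)]
    simp
    omega

theorem pvFlip_invol (xs : List Int) : pvFlip (pvFlip xs) = xs := by
  apply List.ext_getElem?
  intro i
  simp [pvFlip, List.getD, List.getElem?_set]
  split_ifs <;> simp_all [pvBxor1_invol]

theorem pvLoop_parity (l : List String) (s : List Int) :
    l.foldl (fun out mv => if pvIsFq mv then pvFlip out else out) s
      = if l.countP pvIsFq % 2 = 1 then pvFlip s else s := by
  induction l generalizing s with
  | nil => simp
  | cons mv t ih =>
    simp only [List.foldl_cons, List.countP_cons, ih]
    by_cases h : pvIsFq mv = true
    · simp only [h, if_true]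
      by_cases hp : t.countP pvIsFq % 2 = 1
      · rw [if_pos hp, if_neg (by omega), pvFlip_invol]
      · rw [if_neg hp, if_pos (by omega)]
    · simp [h]

theorem pvCnt_eq (l : List String) (c : Int) :
    l.foldl (fun c mv => if altIsFq mv then c + 1 else c) c = c + (l.countP pvIsFq : Int) := by
  induction l generalizing c with
  | nil => simp
  | cons mv t ih =>
    rw [List.foldl_cons, List.countP_cons]
    by_cases h : altIsFq mv = true
    · rw [if_pos h, ih]
      rw [guard_eq] at h
      simp [h]
      omega
    · rw [if_neg h, ih]
      rw [guard_eq] at h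
      simp [h]

-- parity 0: the comprehension is the identity
theorem map_parity_zero (eo : List Int) :
    (PySem.List.enumerate eo).map
      (fun ib => if [(0 : Int), 4, 8, 7].contains ib.1 then PySem.Int.bxor ib.2 0 else ib.2) = eo := by
  simp [PySem.List.map_snd_enumerate]

-- parity 1: the comprehension equals A's four in-place flips (out-of-range set is a no-op)
theorem map_parity_one (eo : List Int) :
    (PySem.List.enumerate eo).map
      (fun ib => if [(0 : Int), 4, 8, 7].contains ib.1 then PySem.Int.bxor ib.2 1 else ib.2)
      = pvFlip eo := by
  apply List.ext_getElem?
  intro i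
  simp [pvFlip, List.getD, List.getElem?_set, PySem.List.getElem?_enumerate]
  by_cases hi : i < eo.length
  · rw [List.getElem?_eq_getElem hi]
    simp
    split_ifs <;> simp_all <;> omega
  · rw [List.getElem?_eq_none (by omega)]
    simp
    split_ifs <;> simp_all <;> omega

-- ===== VERDICT (by name: the statement is the Claim_ definition above) =====
theorem classical_eo_after_sequence_spec : Claim_equal_classical_eo_after_sequence := by
  intro eo_bits seq_moves _hDom _hPre
  unfold Spec_classical_eo_after_sequence classical_eo_after_sequence classical_eo_after_sequence_alt
  rw [pvLoop_parity, pvCnt_eq]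
  rw [(by norm_num : (0 : Int) + (seq_moves.countP pvIsFq : Int) = (seq_moves.countP pvIsFq : Int)),
    PySem.Int.mod_eq_emod_of_pos (by norm_num),
    (by push_cast; ring : ((seq_moves.countP pvIsFq : Int)) % 2 = ((seq_moves.countP pvIsFq % 2 : Nat) : Int))]
  by_cases hp : seq_moves.countP pvIsFq % 2 = 1
  · rw [if_pos hp, hp, Nat.cast_one]
    exact (map_parity_one eo_bits).symm
  · rw [if_neg hp, (by omega : seq_moves.countP pvIsFq % 2 = 0), Nat.cast_zero]
    exact (map_parity_zero eo_bits).symm
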